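-- pv_equiv track=rewrite | github.com/T-THA/SICP | lab01-Code/lab01.py | number_of_six
-- ===== SOURCE A (Python) =====
-- def number_of_six(n):
--     """Return the number of 6 in each digit of a positive integer n.
--
--     >>> number_of_six(666)
--     3
--     >>> number_of_six(123456)
--     1
--     """
--     m = 0
--     while n >= 10:
--         s = n % 10
--         n = n // 10
--         if s == 6:
--             m = m + 1
--         else:
--             m = m
--     if n % 6 == 0:
--         return m + 1
--     else:
--         return m
-- ===== SOURCE B (Python) =====
-- def number_of_six(n):
--     if n < 10:
--         return 1 if n % 6 == 0 else 0
--     return (1 if n % 10 == 6 else 0) + number_of_six(n // 10)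
-- ===== Notes on version B (the rewrite author's own statement) =====
-- stated objective: alternative
-- what changed: Replaces the while loop with an accumulator by direct structural recursion on the integer (peel last digit, recurse on n // 10), with the single-digit base case applying the same n % 6 == 0 test.
import Mathlib
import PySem

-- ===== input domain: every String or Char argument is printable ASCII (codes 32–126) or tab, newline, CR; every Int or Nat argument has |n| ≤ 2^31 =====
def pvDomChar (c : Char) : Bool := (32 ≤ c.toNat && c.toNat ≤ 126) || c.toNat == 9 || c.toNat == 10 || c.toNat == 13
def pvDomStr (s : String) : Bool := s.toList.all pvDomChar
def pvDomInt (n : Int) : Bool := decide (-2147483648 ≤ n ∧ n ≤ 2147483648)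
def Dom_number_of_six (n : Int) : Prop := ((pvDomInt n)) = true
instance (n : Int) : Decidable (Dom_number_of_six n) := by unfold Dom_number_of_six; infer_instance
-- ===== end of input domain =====

-- B replaces the while loop + accumulator with direct structural recursion on the integer; objective: alternative (same cost).
-- ===== PORT A =====
def numberOfSixLoop (n m : Int) : Int :=
  if 10 ≤ n then
    numberOfSixLoop (PySem.Int.floordiv n 10)
      (if PySem.Int.mod n 10 = 6 then m + 1 else m)
  else if PySem.Int.mod n 6 = 0 then m + 1 else m
termination_by n.toNat
decreasing_by
  have : PySem.Int.floordiv n 10 = n / 10 := PySem.Int.floordiv_eq_ediv_of_pos (by omega)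
  rw [this]
  omega

def number_of_six (n : Int) : Int := numberOfSixLoop n 0

-- ===== PORT B =====
def number_of_six_alt (n : Int) : Int :=
  if n < 10 then (if PySem.Int.mod n 6 = 0 then 1 else 0)
  else (if PySem.Int.mod n 10 = 6 then 1 else 0) + number_of_six_alt (PySem.Int.floordiv n 10)
termination_by n.toNat
decreasing_by
  have : PySem.Int.floordiv n 10 = n / 10 := PySem.Int.floordiv_eq_ediv_of_pos (by omega)
  rw [this]
  omega

-- ===== PRECONDITION & SPEC =====
def Spec_number_of_six (n : Int) (out : Int) : Prop := out = number_of_six_alt n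
instance (n : Int) (out : Int) : Decidable (Spec_number_of_six n out) := by unfold Spec_number_of_six; infer_instance

-- ===== CLAIM (what is proved, stated in full; the proofs are below) =====
def Claim_equal_number_of_six : Prop := ∀ (n : Int), Dom_number_of_six n → Spec_number_of_six n (number_of_six n)

-- ===== LEMMAS AND PROOFS =====
theorem loop_eq_add_alt (n m : Int) : numberOfSixLoop n m = m + number_of_six_alt n := by
  by_cases h : 10 ≤ n
  · have ih := loop_eq_add_alt (PySem.Int.floordiv n 10)
      (if PySem.Int.mod n 10 = 6 then m + 1 else m)
    rw [numberOfSixLoop, number_of_six_alt, if_pos h, if_neg (show ¬ n < 10 by omega), ih]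
    split_ifs <;> ring
  · rw [numberOfSixLoop, number_of_six_alt, if_neg h, if_pos (show n < 10 by omega)]
    split_ifs <;> ring
termination_by n.toNat
decreasing_by
  have : PySem.Int.floordiv n 10 = n / 10 := PySem.Int.floordiv_eq_ediv_of_pos (by omega)
  rw [this]
  omega

-- ===== VERDICT (by name: the statement is the Claim_ definition above) =====
theorem number_of_six_spec : Claim_equal_number_of_six := by
  intro n _
  unfold Spec_number_of_six number_of_six
  simpa using loop_eq_add_alt n 0
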